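-- pv_equiv track=rewrite | github.com/aaeilru/uts_stki | src/search_engine.py | boolean_retrieve
-- ===== SOURCE A (Python) =====
-- def boolean_retrieve(query_tokens, index, op="AND"):
--     sets = [index.get(t, set()) for t in query_tokens]
--     if not sets:
--         return []
--     if op == "AND":
--         result = set.intersection(*sets)
--     else:
--         result = set.union(*sets)
--     return sorted(list(result))
-- ===== SOURCE B (Python) =====
-- def boolean_retrieve(query_tokens, index, op="AND"):
--     sets = [index.get(t, set()) for t in query_tokens]
--     if not sets:
--         return []
--     counts = {}
--     for s in sets:
--         for d in s:
--             counts[d] = counts.get(d, 0) + 1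
--     need = len(sets) if op == "AND" else 1
--     return sorted(d for d, c in counts.items() if c >= need)
-- ===== Notes on version B (the rewrite author's own statement) =====
-- stated objective: alternative
-- what changed: Replaces set.intersection/set.union over the retrieved postings with a single counting pass: a dict tallies in how many retrieved sets each document occurs, then documents with count == len(sets) (AND) or count >= 1 (OR) are collected and sorted.
import Mathlib
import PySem

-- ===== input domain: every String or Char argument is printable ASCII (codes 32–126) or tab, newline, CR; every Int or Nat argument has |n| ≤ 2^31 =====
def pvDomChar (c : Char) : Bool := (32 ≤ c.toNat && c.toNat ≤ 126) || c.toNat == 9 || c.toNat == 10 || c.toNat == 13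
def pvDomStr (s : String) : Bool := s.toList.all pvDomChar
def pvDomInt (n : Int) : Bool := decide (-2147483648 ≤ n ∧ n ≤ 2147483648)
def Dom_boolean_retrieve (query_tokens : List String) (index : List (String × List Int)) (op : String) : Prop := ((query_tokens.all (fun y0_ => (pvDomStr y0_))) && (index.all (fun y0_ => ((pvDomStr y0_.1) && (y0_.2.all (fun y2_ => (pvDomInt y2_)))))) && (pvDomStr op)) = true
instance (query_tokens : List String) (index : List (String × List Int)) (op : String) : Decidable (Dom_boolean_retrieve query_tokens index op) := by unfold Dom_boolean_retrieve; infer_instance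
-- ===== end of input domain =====

-- B replaces the set.intersection/set.union folds with one counting pass over the
-- retrieved sets (a dict of occurrence counts, thresholded at len(sets) for AND, 1 for OR);
-- same cost, genuinely different decomposition (objective: alternative).


-- ===== PORT A =====
-- dict values are Python sets: the stored List Int is read as PySem.Set via Set.ofList
def boolean_retrieve (query_tokens : List String) (index : List (String × List Int)) (op : String) : List Int :=
  let d := PySem.Dict.ofList index
  let sets := query_tokens.map (fun t => PySem.Set.ofList ((d.get? t).getD []))
  match sets with
  | [] => []
  | s0 :: rest =>
    let result := if op == "AND"
      then rest.foldl (fun a t => PySem.Set.inter a t) s0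
      else rest.foldl (fun a t => PySem.Set.union a t) s0
    PySem.List.sorted result (fun x => x) false

-- ===== PORT B =====
def boolean_retrieve_alt (query_tokens : List String) (index : List (String × List Int)) (op : String) : List Int :=
  let d := PySem.Dict.ofList index
  let sets := query_tokens.map (fun t => PySem.Set.ofList ((d.get? t).getD []))
  if sets.isEmpty then []
  else
    let counts := sets.foldl (fun c t => t.foldl (fun c x => c.insert x (c.getD x 0 + 1)) c) PySem.Dict.empty
    let need : Int := if op == "AND" then (sets.length : Int) else 1
    PySem.List.sorted ((counts.items.filter (fun p => decide (need ≤ p.2))).map (·.1)) (fun x => x) false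

-- ===== PRECONDITION & SPEC =====
def Spec_boolean_retrieve (query_tokens : List String) (index : List (String × List Int)) (op : String) (out : List Int) : Prop := out = boolean_retrieve_alt query_tokens index op
instance (query_tokens : List String) (index : List (String × List Int)) (op : String) (out : List Int) : Decidable (Spec_boolean_retrieve query_tokens index op out) := by unfold Spec_boolean_retrieve; infer_instance

-- ===== CLAIM (what is proved, stated in full; the proofs are below) =====
def Claim_equal_boolean_retrieve : Prop := ∀ (query_tokens : List String) (index : List (String × List Int)) (op : String), Dom_boolean_retrieve query_tokens index op → Spec_boolean_retrieve query_tokens index op (boolean_retrieve query_tokens index op)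

-- ===== LEMMAS AND PROOFS =====

-- the counting dict built by B
def pvCounts (L : List (List Int)) : PySem.Dict Int Int :=
  L.foldl (fun c t => t.foldl (fun c x => c.insert x (c.getD x 0 + 1)) c) PySem.Dict.empty

theorem pvCounts_getD (L : List (List Int)) (d : PySem.Dict Int Int) (x : Int) :
    (L.foldl (fun c t => t.foldl (fun c x => c.insert x (c.getD x 0 + 1)) c) d).getD x 0
      = d.getD x 0 + (L.map (fun t => (t.count x : Int))).sum := by
  induction L generalizing d with
  | nil => simp
  | cons t L ih =>
    simp only [List.foldl_cons, ih, PySem.Dict.getD_foldl_insert_add_one, List.map_cons,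
      List.sum_cons]
    ring

theorem pvCounts_keys_nodup (L : List (List Int)) : (pvCounts L).keys.Nodup := by
  induction L using List.reverseRecOn with
  | nil => simp only [pvCounts, List.foldl_nil]; exact PySem.Dict.nodup_keys_empty
  | append_singleton L t ih =>
    simpa [pvCounts, List.foldl_append] using
      PySem.Dict.nodup_keys_foldl_insert t _ _ ih

theorem pv_mem_keys_foldl (L : List (List Int)) (d : PySem.Dict Int Int) (x : Int) :
    x ∈ (L.foldl (fun c t => t.foldl (fun c x => c.insert x (c.getD x 0 + 1)) c) d).keys
      ↔ x ∈ d.keys ∨ ∃ t ∈ L, x ∈ t := by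
  induction L generalizing d with
  | nil => simp
  | cons t L ih =>
    simp only [List.foldl_cons, ih, PySem.Dict.keys_foldl_insert, PySem.Set.mem_update,
      List.mem_cons]
    constructor
    · rintro ((h | h) | ⟨u, hu, hx⟩)
      · exact Or.inl h
      · exact Or.inr ⟨t, Or.inl rfl, h⟩
      · exact Or.inr ⟨u, Or.inr hu, hx⟩
    · rintro (h | ⟨u, (rfl | hu), hx⟩)
      · exact Or.inl (Or.inl h)
      · exact Or.inl (Or.inr hx)
      · exact Or.inr ⟨u, hu, hx⟩

theorem pvCounts_mem_keys (L : List (List Int)) (x : Int) :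
    x ∈ (pvCounts L).keys ↔ ∃ t ∈ L, x ∈ t := by
  simpa [pvCounts] using pv_mem_keys_foldl L PySem.Dict.empty x

theorem pv_sum_indicator (L : List (List Int)) (hnd : ∀ t ∈ L, t.Nodup) (x : Int) :
    (L.map (fun t => (t.count x : Int))).sum = ((L.countP (fun t => decide (x ∈ t)) : Nat) : Int) := by
  induction L with
  | nil => simp
  | cons t L ih =>
    simp only [List.map_cons, List.sum_cons, List.countP_cons,
      ih (fun u hu => hnd u (List.mem_cons_of_mem t hu))]
    by_cases hx : x ∈ t
    · rw [List.count_eq_one_of_mem (hnd t (List.mem_cons_self)) hx]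
      simp [hx]
      ring
    · rw [List.count_eq_zero.mpr hx]
      simp [hx]

theorem pvA_and_mem (rest : List (List Int)) (s0 : List Int) (x : Int) :
    x ∈ rest.foldl (fun a t => PySem.Set.inter a t) s0 ↔ x ∈ s0 ∧ ∀ t ∈ rest, x ∈ t := by
  induction rest generalizing s0 with
  | nil => simp
  | cons t rest ih =>
    simp [List.foldl_cons, ih, PySem.Set.mem_inter]
    tauto

theorem pvA_or_mem (rest : List (List Int)) (s0 : List Int) (x : Int) :
    x ∈ rest.foldl (fun a t => PySem.Set.union a t) s0 ↔ x ∈ s0 ∨ ∃ t ∈ rest, x ∈ t := by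
  induction rest generalizing s0 with
  | nil => simp
  | cons t rest ih =>
    simp [List.foldl_cons, ih, PySem.Set.mem_union]
    tauto

theorem pvA_and_nodup (rest : List (List Int)) (s0 : List Int) (h : s0.Nodup) :
    (rest.foldl (fun a t => PySem.Set.inter a t) s0).Nodup := by
  induction rest generalizing s0 with
  | nil => exact h
  | cons t rest ih => exact ih _ (PySem.Set.nodup_inter s0 t h)

theorem pvA_or_nodup (rest : List (List Int)) (s0 : List Int) (h : s0.Nodup) :
    (rest.foldl (fun a t => PySem.Set.union a t) s0).Nodup := by
  induction rest generalizing s0 with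
  | nil => exact h
  | cons t rest ih => exact ih _ (PySem.Set.nodup_union s0 t h)

-- main: A's post-retrieval computation equals B's, for a nonempty list of nodup sets
theorem pv_main (s0 : List Int) (rest : List (List Int)) (hnd0 : s0.Nodup)
    (hnd : ∀ t ∈ rest, t.Nodup) (op : String) :
    PySem.List.sorted
        (if op == "AND" then rest.foldl (fun a t => PySem.Set.inter a t) s0
         else rest.foldl (fun a t => PySem.Set.union a t) s0) (fun x => x) false
    = PySem.List.sorted
        (((pvCounts (s0 :: rest)).items.filter
            (fun p => decide ((if op == "AND" then ((s0 :: rest).length : Int) else 1) ≤ p.2))).map (·.1))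
        (fun x => x) false := by
  -- rewrite B's filtered items as a filter over the (nodup) keys
  have hknd := pvCounts_keys_nodup (s0 :: rest)
  set need : Int := if op == "AND" then ((s0 :: rest).length : Int) else 1 with hneed
  have hitems :
      ((pvCounts (s0 :: rest)).items.filter (fun p => decide (need ≤ p.2))).map (·.1)
        = (pvCounts (s0 :: rest)).keys.filter
            (fun k => decide (need ≤ (pvCounts (s0 :: rest)).getD k 0)) := by
    rw [PySem.Dict.items_eq_map_keys _ hknd 0, List.filter_map, List.map_map]
    simp [Function.comp_def]
  rw [hitems]
  -- the count each key carries
  have hgetD : ∀ x : Int, (pvCounts (s0 :: rest)).getD x 0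
      = (((s0 :: rest).countP (fun t => decide (x ∈ t)) : Nat) : Int) := by
    intro x
    have := pvCounts_getD (s0 :: rest) PySem.Dict.empty x
    rw [pvCounts, this, pv_sum_indicator (s0 :: rest) (fun t ht => by
      cases ht with
      | head => exact hnd0
      | tail _ h => exact hnd _ h) x]
    simp
  have hle : ∀ x : Int, (s0 :: rest).countP (fun t => decide (x ∈ t)) ≤ (s0 :: rest).length :=
    fun x => List.countP_le_length
  apply PySem.List.sorted_eq_sorted_of_perm _ _ _ (fun a b h => h)
  -- both sides are nodup lists with the same membership
  have hndB := List.Nodup.filter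
      (fun k => decide (need ≤ (pvCounts (s0 :: rest)).getD k 0)) hknd
  by_cases hop : (op == "AND") = true
  · rw [if_pos hop]
    refine (List.perm_ext_iff_of_nodup (pvA_and_nodup rest s0 hnd0) hndB).mpr ?_
    intro x
    rw [pvA_and_mem, List.mem_filter, pvCounts_mem_keys, hgetD x, hneed, if_pos hop]
    have hiff := List.countP_eq_length (l := s0 :: rest) (p := fun t => decide (x ∈ t))
    constructor
    · rintro ⟨hx0, hxr⟩
      have hall : ∀ t ∈ (s0 :: rest), x ∈ t := by
        intro t ht
        cases ht with
        | head => exact hx0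
        | tail _ h => exact hxr _ h
      refine ⟨⟨s0, List.mem_cons_self, hx0⟩, ?_⟩
      have : (s0 :: rest).countP (fun t => decide (x ∈ t)) = (s0 :: rest).length :=
        hiff.mpr (fun t ht => by simpa using hall t ht)
      simp [this]
    · rintro ⟨-, hcnt⟩
      have : (s0 :: rest).countP (fun t => decide (x ∈ t)) = (s0 :: rest).length := by
        have := hle x
        simp only [decide_eq_true_eq] at hcnt ⊢
        omega
      have hall := hiff.mp this
      exact ⟨by simpa using hall s0 List.mem_cons_self,
        fun t ht => by simpa using hall t (List.mem_cons_of_mem s0 ht)⟩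
  · rw [if_neg hop]
    refine (List.perm_ext_iff_of_nodup (pvA_or_nodup rest s0 hnd0) hndB).mpr ?_
    intro x
    rw [pvA_or_mem, List.mem_filter, pvCounts_mem_keys, hgetD x, hneed, if_neg hop]
    have hpos := List.countP_pos_iff (l := s0 :: rest) (p := fun t => decide (x ∈ t))
    constructor
    · intro h
      have hex : ∃ t ∈ (s0 :: rest), x ∈ t := by
        cases h with
        | inl h => exact ⟨s0, List.mem_cons_self, h⟩
        | inr h => obtain ⟨t, ht, hx⟩ := h; exact ⟨t, List.mem_cons_of_mem s0 ht, hx⟩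
      have : 0 < (s0 :: rest).countP (fun t => decide (x ∈ t)) :=
        hpos.mpr (by obtain ⟨t, ht, hx⟩ := hex; exact ⟨t, ht, by simpa using hx⟩)
      refine ⟨hex, ?_⟩
      simp only [decide_eq_true_eq]
      omega
    · rintro ⟨hex, -⟩
      obtain ⟨t, ht, hx⟩ := hex
      cases ht with
      | head => exact Or.inl hx
      | tail _ h => exact Or.inr ⟨t, h, hx⟩

theorem boolean_retrieve_eq (query_tokens : List String) (index : List (String × List Int)) (op : String) :
    boolean_retrieve query_tokens index op = boolean_retrieve_alt query_tokens index op := by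
  unfold boolean_retrieve boolean_retrieve_alt
  cases query_tokens with
  | nil => rfl
  | cons q qs =>
    exact pv_main _ _ (PySem.Set.nodup_ofList _)
      (by
        intro t ht
        simp only [List.mem_map] at ht
        obtain ⟨q', _, rfl⟩ := ht
        exact PySem.Set.nodup_ofList _) op

-- ===== VERDICT (by name: the statement is the Claim_ definition above) =====
theorem boolean_retrieve_spec : Claim_equal_boolean_retrieve := by
  intro qs index op _
  exact boolean_retrieve_eq qs index op
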